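-- pv_equiv track=rewrite | github.com/McLoad6/Stock-Market-Strategy-Tester | file_handler.py | time_occurrence
-- ===== SOURCE A (Python) =====
-- def time_occurrence(dict):
--     key_list = list(dict.keys())
--     time_dict = {}
--     for key in key_list:
--         key1 = str(key)
--         hour = key1[-4:]
--         if hour in time_dict:
--             time_dict[hour] +=1
--         else:
--             time_dict[hour] = 1
--     return time_dict
-- ===== SOURCE B (Python) =====
-- def time_occurrence(dict):
--     suffixes = [str(k)[-4:] for k in dict]
--     result = {}
--     for s in suffixes:
--         if s not in result:
--             result[s] = suffixes.count(s)
--     return result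
-- ===== Notes on version B (the rewrite author's own statement) =====
-- stated objective: alternative
-- what changed: B first materialises the list of 4-char suffixes, then for each first occurrence counts it with one list.count pass, instead of A's incremental per-key dict increment.
import Mathlib
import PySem

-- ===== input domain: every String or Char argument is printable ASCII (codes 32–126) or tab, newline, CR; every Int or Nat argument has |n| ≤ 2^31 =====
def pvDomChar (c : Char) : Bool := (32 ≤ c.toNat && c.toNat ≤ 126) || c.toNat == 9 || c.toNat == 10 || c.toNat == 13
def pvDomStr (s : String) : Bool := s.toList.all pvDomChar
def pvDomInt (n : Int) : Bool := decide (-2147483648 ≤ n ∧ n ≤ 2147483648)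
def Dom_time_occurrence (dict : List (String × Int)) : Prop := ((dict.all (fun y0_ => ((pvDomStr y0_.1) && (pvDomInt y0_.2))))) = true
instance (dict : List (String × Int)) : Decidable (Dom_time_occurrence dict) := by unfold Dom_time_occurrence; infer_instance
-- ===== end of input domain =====

-- B counts each distinct suffix with one list-count pass over a prebuilt suffix list instead of A's
-- per-key incremental dict update (objective: alternative; same return value, no side effects).

-- ===== PORT A =====
-- str(key)[-4:] (key is a str, so str(key) = key)
def pvSuffix4 (s : String) : String := String.ofList (PySem.List.slice s.toList (some (-4)) none)

def time_occurrence (dict : List (String × Int)) : List (String × Int) :=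
  -- list(dict.keys()): the dict's keys, first occurrences in insertion order
  let key_list : List String := PySem.List.dedup (dict.map Prod.fst)
  let time_dict : PySem.Dict String Int :=
    key_list.foldl (fun d key =>
      let key1 := key
      let hour := pvSuffix4 key1
      if d.contains hour then d.insert hour (d.getD hour 0 + 1)
      else d.insert hour 1) PySem.Dict.empty
  time_dict.items

-- ===== PORT B =====
def time_occurrence_alt (dict : List (String × Int)) : List (String × Int) :=
  let suffixes : List String := (PySem.List.dedup (dict.map Prod.fst)).map (fun k => pvSuffix4 k)
  let result : PySem.Dict String Int :=
    suffixes.foldl (fun d s =>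
      if d.contains s then d else d.insert s ((suffixes.count s : Int))) PySem.Dict.empty
  result.items

-- ===== PRECONDITION & SPEC =====
def Spec_time_occurrence (dict : List (String × Int)) (out : List (String × Int)) : Prop := out = time_occurrence_alt dict
instance (dict : List (String × Int)) (out : List (String × Int)) : Decidable (Spec_time_occurrence dict out) := by unfold Spec_time_occurrence; infer_instance

-- ===== CLAIM (what is proved, stated in full; the proofs are below) =====
def Claim_equal_time_occurrence : Prop := ∀ (dict : List (String × Int)), Dom_time_occurrence dict → Spec_time_occurrence dict (time_occurrence dict)

-- ===== LEMMAS AND PROOFS =====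

-- a dict whose items are (k, f k) over a key list S contains exactly the keys in S
theorem pv_contains_mk_map (S : List String) (f : String → Int) (s : String) :
    (PySem.Dict.mk (S.map (fun k => (k, f k)))).contains s = S.contains s := by
  simp [PySem.Dict.contains, List.any_map, Function.comp_def, List.any_beq']

-- B's loop: "insert on first sight with value f s" keeps the dict in shape (k, f k) over the seen set
theorem pv_foldB (f : String → Int) (l : List String) : ∀ (S : PySem.Set String),
    l.foldl (fun d s => if d.contains s then d else d.insert s (f s))
        (PySem.Dict.mk (S.map (fun k => (k, f k))))
      = PySem.Dict.mk ((l.foldl PySem.Set.add S).map (fun k => (k, f k))) := by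
  induction l with
  | nil => intro S; rfl
  | cons s l ih =>
    intro S
    by_cases hm : s ∈ S
    · have h1 : (PySem.Dict.mk (S.map (fun k => (k, f k)))).contains s = true := by
        rw [pv_contains_mk_map]; simpa using hm
      have h2 : PySem.Set.add S s = S := by simp [PySem.Set.add, hm]
      simp only [List.foldl_cons, h1, if_true, h2]
      exact ih S
    · have h1 : (PySem.Dict.mk (S.map (fun k => (k, f k)))).contains s = false := by
        rw [pv_contains_mk_map]; simpa using hm
      have h2 : PySem.Set.add S s = S ++ [s] := by simp [PySem.Set.add, hm]
      have h3 : (PySem.Dict.mk (S.map (fun k => (k, f k)))).insert s (f s)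
          = PySem.Dict.mk ((S ++ [s]).map (fun k => (k, f k))) := by
        simp [PySem.Dict.insert, h1]
      simp only [List.foldl_cons, h1, Bool.false_eq_true, if_false, h3, h2]
      exact ih (S ++ [s])

theorem pv_foldB_empty (f : String → Int) (l : List String) :
    l.foldl (fun d s => if d.contains s then d else d.insert s (f s)) PySem.Dict.empty
      = PySem.Dict.mk ((PySem.Set.ofList l).map (fun k => (k, f k))) := by
  have h := pv_foldB f l []
  simp only [List.map_nil] at h
  rw [PySem.Set.ofList_eq_foldl]
  exact h

-- a key not in the dict looks up to the default
theorem pv_getD_of_not_contains (d : PySem.Dict String Int) (k : String)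
    (h : d.contains k = false) : d.getD k 0 = 0 := by
  simp only [PySem.Dict.contains, List.any_eq_false] at h
  simp [PySem.Dict.getD, PySem.Dict.get?, List.find?_eq_none.mpr h]

-- A's loop body is the counter loop body
theorem pv_stepA_eq (d : PySem.Dict String Int) (h : String) :
    (if d.contains h then d.insert h (d.getD h 0 + 1) else d.insert h 1)
      = d.insert h (d.getD h 0 + 1) := by
  by_cases hc : d.contains h = true
  · simp [hc]
  · simp only [Bool.not_eq_true] at hc
    simp [hc, pv_getD_of_not_contains d h hc]

theorem time_occurrence_eq (dict : List (String × Int)) :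
    time_occurrence dict = time_occurrence_alt dict := by
  unfold time_occurrence time_occurrence_alt
  dsimp only
  have e1 : ((PySem.List.dedup (dict.map Prod.fst)).map (fun k => pvSuffix4 k)).foldl
      (fun (d : PySem.Dict String Int) h =>
        if d.contains h = true then d.insert h (d.getD h 0 + 1) else d.insert h 1)
      PySem.Dict.empty
    = (PySem.List.dedup (dict.map Prod.fst)).foldl
      (fun d key =>
        if d.contains (pvSuffix4 key) = true then d.insert (pvSuffix4 key) (d.getD (pvSuffix4 key) 0 + 1)
        else d.insert (pvSuffix4 key) 1)
      PySem.Dict.empty := List.foldl_map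
  have ec : ((PySem.List.dedup (dict.map Prod.fst)).map (fun k => pvSuffix4 k)).foldl
      (fun (d : PySem.Dict String Int) h =>
        if d.contains h = true then d.insert h (d.getD h 0 + 1) else d.insert h 1)
      PySem.Dict.empty
    = PySem.Dict.counter ((PySem.List.dedup (dict.map Prod.fst)).map (fun k => pvSuffix4 k)) :=
    (PySem.List.foldl_congr_mem _ _ _ _ (fun d h _ => pv_stepA_eq d h)).trans
      (PySem.Dict.foldl_insert_getD_add_one_eq_counter _)
  have e2 := pv_foldB_empty
    (fun s => (((PySem.List.dedup (dict.map Prod.fst)).map (fun k => pvSuffix4 k)).count s : Int))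
    ((PySem.List.dedup (dict.map Prod.fst)).map (fun k => pvSuffix4 k))
  have e3 := PySem.Dict.items_counter
    ((PySem.List.dedup (dict.map Prod.fst)).map (fun k => pvSuffix4 k))
  exact (congrArg PySem.Dict.items (e1.symm.trans ec)).trans
    (e3.trans (congrArg PySem.Dict.items e2).symm)

-- ===== VERDICT (by name: the statement is the Claim_ definition above) =====
theorem time_occurrence_spec : Claim_equal_time_occurrence := by
  intro dict _
  exact time_occurrence_eq dict
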